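-- pv_equiv track=rewrite | github.com/alexanderivanov2424/AI_Automation | clustering/similarity.py | getPointsY
-- ===== SOURCE A (Python) =====
-- def getPointsY(y,list):
--     if len(list) == 0:
--         return []
--     dir = list.pop(0)
--     if dir in ['l','r','s']:
--         return [y] + getPointsY(y,list)
--     elif dir == 'd':
--         return [y-1] + getPointsY(y-1,list)
--     else:
--         return [y+1] + getPointsY(y+1,list)
-- ===== SOURCE B (Python) =====
-- def getPointsY(y, list):
--     # Iterative single pass: accumulate y and append (O(n) vs A's O(n^2)
--     # quadratic list concatenations). NOTE: A empties its `list` argument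
--     # in place via pop(0); B does not mutate it (return value is identical).
--     out = []
--     for d in list:
--         if d == 'd':
--             y -= 1
--         elif d not in ('l', 'r', 's'):
--             y += 1
--         out.append(y)
--     return out
-- ===== Notes on version B (the rewrite author's own statement) =====
-- stated objective: faster
-- what changed: Replaced the recursion with repeated list-prepend concatenations (and destructive pop(0)) by one iterative pass that accumulates y and appends to an output list.
import Mathlib
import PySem

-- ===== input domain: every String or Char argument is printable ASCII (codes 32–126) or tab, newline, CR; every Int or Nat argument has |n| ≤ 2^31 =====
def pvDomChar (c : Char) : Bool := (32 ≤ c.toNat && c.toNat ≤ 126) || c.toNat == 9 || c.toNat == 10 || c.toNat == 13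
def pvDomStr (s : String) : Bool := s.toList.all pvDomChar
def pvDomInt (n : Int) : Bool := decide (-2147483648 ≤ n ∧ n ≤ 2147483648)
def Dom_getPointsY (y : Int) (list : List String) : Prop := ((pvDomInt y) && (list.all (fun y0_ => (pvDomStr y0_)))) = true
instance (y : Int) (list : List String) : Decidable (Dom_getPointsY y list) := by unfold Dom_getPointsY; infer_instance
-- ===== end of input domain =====

-- B replaces A's recursion with O(n^2) list concatenations (and destructive pop(0))
-- by one iterative O(n) pass; A mutates its list argument (empties it), B does not —
-- equivalence proved is about the return value only.


-- ===== PORT A =====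
def getPointsY (y : Int) (list : List String) : List Int :=
  match list with
  | [] => []
  | dir :: rest =>
    if dir = "l" ∨ dir = "r" ∨ dir = "s" then [y] ++ getPointsY y rest
    else if dir = "d" then [y - 1] ++ getPointsY (y - 1) rest
    else [y + 1] ++ getPointsY (y + 1) rest

-- ===== PORT B =====
def getPointsY_step (p : Int × List Int) (d : String) : Int × List Int :=
  let y := if d = "d" then p.1 - 1
           else if ¬ (d = "l" ∨ d = "r" ∨ d = "s") then p.1 + 1
           else p.1
  (y, y :: p.2)

def getPointsY_alt (y : Int) (list : List String) : List Int :=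
  (list.foldl getPointsY_step (y, [])).2.reverse

-- ===== PRECONDITION & SPEC =====
def Spec_getPointsY (y : Int) (list : List String) (out : List Int) : Prop := out = getPointsY_alt y list
instance (y : Int) (list : List String) (out : List Int) : Decidable (Spec_getPointsY y list out) := by unfold Spec_getPointsY; infer_instance

-- ===== CLAIM (what is proved, stated in full; the proofs are below) =====
def Claim_equal_getPointsY : Prop := ∀ (y : Int) (list : List String), Dom_getPointsY y list → Spec_getPointsY y list (getPointsY y list)

-- ===== LEMMAS AND PROOFS =====
theorem getPointsY_foldl_inv (list : List String) (y : Int) (acc : List Int) :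
    ((list.foldl getPointsY_step (y, acc)).2).reverse = acc.reverse ++ getPointsY y list := by
  induction list generalizing y acc with
  | nil => simp [getPointsY]
  | cons d rest ih =>
    simp only [List.foldl_cons, getPointsY_step, getPointsY]
    by_cases h1 : d = "l" ∨ d = "r" ∨ d = "s"
    · have h2 : d ≠ "d" := by rcases h1 with h | h | h <;> simp [h]
      simp [h1, h2, ih]
    · by_cases h2 : d = "d"
      · simp [h2, ih]
      · simp [h1, h2, ih]

-- ===== VERDICT (by name: the statement is the Claim_ definition above) =====
theorem getPointsY_spec : Claim_equal_getPointsY := by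
  intro y list _
  unfold Spec_getPointsY getPointsY_alt
  have := getPointsY_foldl_inv list y []
  simpa using this.symm
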